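-- pv_equiv track=rewrite | github.com/zmfpdl64/Programers_code_test | 삼성/패턴마디의길이.py | divString
-- ===== SOURCE A (Python) =====
-- def divString(ins):
--     for i in range(1, 11):
--         lists = []
--         for j in range(0, 30//i-1):
--             lists.append(ins[i*j:i*(j+1)])
--         for j in range(1, len(lists)):
--             if lists[j] == lists[j-1]:
--                 pass
--             else:
--                 break
--             if j == len(lists)-1 :
--                 return i
--     return -1
-- ===== SOURCE B (Python) =====
-- def divString(ins):
--     for i in range(1, 11):
--         n = 30 // i - 1
--         if ins[:i*n] == ins[:i] * n:
--             return i
--     return -1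
-- ===== Notes on version B (the rewrite author's own statement) =====
-- stated objective: simpler
-- what changed: Replaces the chunk-list construction and the inner consecutive-compare loop with a single closed-form periodicity test ins[:i*n] == ins[:i]*n per candidate length i.
import Mathlib
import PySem

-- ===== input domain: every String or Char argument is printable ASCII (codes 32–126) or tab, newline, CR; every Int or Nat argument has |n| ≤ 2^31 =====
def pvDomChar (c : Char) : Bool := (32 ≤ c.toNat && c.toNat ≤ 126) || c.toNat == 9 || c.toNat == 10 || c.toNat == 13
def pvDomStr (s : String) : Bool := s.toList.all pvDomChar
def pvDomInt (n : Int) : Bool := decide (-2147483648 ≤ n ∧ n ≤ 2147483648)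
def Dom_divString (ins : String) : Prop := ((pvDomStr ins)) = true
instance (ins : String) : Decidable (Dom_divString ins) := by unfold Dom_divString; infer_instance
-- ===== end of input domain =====

-- B replaces A's chunk-list build plus inner consecutive-compare loop with one
-- closed-form repeated-prefix comparison per candidate length (objective: simpler).

-- ===== PORT A =====
-- inner 'for j in range(1, len(lists))' loop with its pass/break/return-i logic
def pvInnerA (lists : List (List Char)) (j : Nat) : Bool :=
  if j < lists.length then
    if lists.getD j [] = lists.getD (j-1) [] then
      if j = lists.length - 1 then true else pvInnerA lists (j+1)
    else false
  else false
termination_by lists.length - j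
decreasing_by omega

-- outer 'for i in range(1, 11)' loop with early return
def pvGoA (l : List Char) : List Int → Int
  | [] => -1
  | i :: rest =>
      if pvInnerA ((PySem.List.pyRange 0 (PySem.Int.floordiv 30 i - 1) 1).foldl
          (fun acc j => acc ++ [PySem.List.slice l (some (i*j)) (some (i*(j+1)))]) []) 1
      then i else pvGoA l rest

def divString (ins : String) : Int := pvGoA ins.toList (PySem.List.pyRange 1 11 1)

-- ===== PORT B =====
-- 'if ins[:i*n] == ins[:i] * n: return i' for each i, where n = 30//i - 1
def pvGoB (l : List Char) : List Int → Int
  | [] => -1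
  | i :: rest =>
      if PySem.List.slice l none (some (i * (PySem.Int.floordiv 30 i - 1)))
          = (List.replicate (PySem.Int.floordiv 30 i - 1).toNat (PySem.List.slice l none (some i))).flatten
      then i else pvGoB l rest

def divString_alt (ins : String) : Int := pvGoB ins.toList (PySem.List.pyRange 1 11 1)

-- ===== PRECONDITION & SPEC =====
def Spec_divString (ins : String) (out : Int) : Prop := out = divString_alt ins
instance (ins : String) (out : Int) : Decidable (Spec_divString ins out) := by unfold Spec_divString; infer_instance

-- ===== CLAIM (what is proved, stated in full; the proofs are below) =====
def Claim_equal_divString : Prop := ∀ (ins : String), Dom_divString ins → Spec_divString ins (divString ins)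

-- ===== LEMMAS AND PROOFS =====

-- the chunk list A builds, in closed form
def pvChunks (i n : Nat) (l : List Char) : List (List Char) :=
  (List.range n).map (fun j => (l.drop (i*j)).take i)

theorem pv_foldl_append {α β : Type} (g : α → β) :
    ∀ (xs : List α) (init : List β),
      xs.foldl (fun acc j => acc ++ [g j]) init = init ++ xs.map g := by
  intro xs
  induction xs with
  | nil => intro init; simp
  | cons x xs ih => intro init; simp [List.foldl_cons, ih]

theorem pv_lists_eq (i n : Nat) (l : List Char) :
    ((PySem.List.pyRange 0 ((n : Int)) 1).foldl
      (fun acc j => acc ++ [PySem.List.slice l (some ((i : Int)*j)) (some ((i : Int)*(j+1)))]) [])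
      = pvChunks i n l := by
  rw [pv_foldl_append, List.nil_append, PySem.List.pyRange_one, List.map_map, pvChunks]
  have h0 : (((n : Int)) - 0).toNat = n := by simp
  rw [h0]
  apply List.map_congr_left
  intro k hk
  show PySem.List.slice l (some ((i : Int)*(0 + (k : Int)))) (some ((i : Int)*((0 + (k : Int))+1)))
      = (l.drop (i*k)).take i
  have e1 : (i : Int)*(0 + (k : Int)) = ((i*k : Nat) : Int) := by push_cast; ring
  have e2 : (i : Int)*((0 + (k : Int))+1) = ((i*k : Nat) : Int) + ((i : Nat) : Int) := by push_cast; ring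
  rw [e1, e2, PySem.List.slice_natCast_add]

theorem pvInnerA_spec (lists : List (List Char)) :
    ∀ (fuel j : Nat), lists.length ≤ j + fuel → 1 ≤ j →
      (pvInnerA lists j = true ↔
        (j < lists.length ∧ ∀ k, j ≤ k → k < lists.length → lists.getD k [] = lists.getD (k-1) [])) := by
  intro fuel
  induction fuel with
  | zero =>
      intro j hle _
      rw [pvInnerA, if_neg (by omega)]
      exact iff_of_false (by simp) (fun h => absurd h.1 (by omega))
  | succ m ih =>
      intro j hle hj
      rw [pvInnerA]
      by_cases hlt : j < lists.length
      · rw [if_pos hlt]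
        by_cases heq : lists.getD j [] = lists.getD (j-1) []
        · rw [if_pos heq]
          by_cases hlast : j = lists.length - 1
          · rw [if_pos hlast]
            simp only [true_iff]
            refine ⟨hlt, ?_⟩
            intro k hk1 hk2
            have : k = j := by omega
            subst this; exact heq
          · rw [if_neg hlast]
            rw [ih (j+1) (by omega) (by omega)]
            constructor
            · rintro ⟨_, hall⟩
              refine ⟨hlt, ?_⟩
              intro k hk1 hk2
              rcases Nat.eq_or_lt_of_le hk1 with h | h
              · subst h; exact heq
              · exact hall k (by omega) hk2
            · rintro ⟨_, hall⟩
              refine ⟨by omega, ?_⟩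
              intro k hk1 hk2
              exact hall k (by omega) hk2
        · rw [if_neg heq]
          exact iff_of_false (by simp) (fun hh => heq (hh.2 j (le_refl j) hlt))
      · rw [if_neg hlt]
        exact iff_of_false (by simp) (fun h => absurd h.1 (by omega))

theorem pv_consec_iff_chain (lists : List (List Char)) :
    (∀ k, 1 ≤ k → k < lists.length → lists.getD k [] = lists.getD (k-1) []) ↔
      lists.IsChain Eq := by
  rw [List.isChain_iff_getElem]
  constructor
  · intro h i hi
    have hh := h (i+1) (by omega) hi
    rw [List.getD_eq_getElem _ _ hi, List.getD_eq_getElem _ _ (by omega)] at hh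
    simpa using hh.symm
  · intro h k h1 hk
    have hh := h (k-1) (by omega : k - 1 + 1 < lists.length)
    rw [List.getD_eq_getElem _ _ hk, List.getD_eq_getElem _ _ (by omega)]
    have e : k - 1 + 1 = k := by omega
    simp only [e] at hh
    exact hh.symm

theorem pvChunks_succ (i n : Nat) (l : List Char) :
    pvChunks i (n+1) l = l.take i :: pvChunks i n (l.drop i) := by
  unfold pvChunks
  rw [List.range_succ_eq_map, List.map_cons, List.map_map]
  simp only [Nat.mul_zero, List.drop_zero]
  congr 1
  apply List.map_congr_left
  intro k _
  show (l.drop (i*(k+1))).take i = ((l.drop i).drop (i*k)).take i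
  rw [List.drop_drop]
  congr 2
  ring

theorem pv_chain_iff_rep (i : Nat) (_hi : 1 ≤ i) :
    ∀ (n : Nat) (l : List Char),
      (pvChunks i n l).IsChain Eq ↔ l.take (i*n) = (List.replicate n (l.take i)).flatten := by
  intro n
  induction n with
  | zero => intro l; simp [pvChunks]
  | succ m ihm =>
      intro l
      rw [pvChunks_succ]
      cases m with
      | zero => simp [pvChunks]
      | succ p =>
          rw [pvChunks_succ, List.isChain_cons_cons, ← pvChunks_succ, ihm (l.drop i)]
          have hrhs : (l.take (i*(p+1+1)) = (List.replicate (p+1+1) (l.take i)).flatten) ↔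
              ((l.drop i).take (i*(p+1)) = (List.replicate (p+1) (l.take i)).flatten) := by
            have e : i*(p+1+1) = i + i*(p+1) := by ring
            rw [e, List.take_add]
            conv_lhs => rw [List.replicate_succ, List.flatten_cons]
            exact List.append_right_inj _
          rw [hrhs]
          constructor
          · rintro ⟨h1, h2⟩
            rw [h2, h1]
          · intro h
            by_cases hlen : i ≤ l.length
            · have hc0 : (l.take i).length = i := by simp [hlen]
              have hpre : (l.drop i).take i = l.take i := by
                have st : (l.drop i).take i = ((l.drop i).take (i*(p+1))).take i := by
                  rw [List.take_take, min_eq_left (Nat.le_mul_of_pos_right i (by omega))]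
                rw [st, h, List.replicate_succ, List.flatten_cons]
                exact List.take_left' hc0
              exact ⟨hpre.symm, by rw [hpre]; exact h⟩
            · have hdrop : l.drop i = [] := List.drop_eq_nil_of_le (by omega)
              have hnil : l.take i = [] := by
                rw [hdrop] at h
                simp only [List.take_nil] at h
                have hmem : l.take i ∈ List.replicate (p+1) (l.take i) :=
                  List.mem_replicate.mpr ⟨by omega, rfl⟩
                have := (List.flatten_eq_nil_iff.mp h.symm) _ hmem
                exact this
              refine ⟨by simp [hdrop, hnil], by simp [hdrop]⟩

theorem pv_cond_eq (iN nN : Nat) (hi : 1 ≤ iN) (hn : 2 ≤ nN) (l : List Char) :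
    (pvInnerA ((PySem.List.pyRange 0 ((nN : Int)) 1).foldl
        (fun acc j => acc ++ [PySem.List.slice l (some ((iN : Int)*j)) (some ((iN : Int)*(j+1)))]) []) 1 = true)
    ↔ (PySem.List.slice l none (some ((iN : Int)*(nN : Int)))
        = (List.replicate ((nN : Int)).toNat (PySem.List.slice l none (some ((iN : Int))))).flatten) := by
  rw [pv_lists_eq]
  have hlen : (pvChunks iN nN l).length = nN := by simp [pvChunks]
  rw [pvInnerA_spec (pvChunks iN nN l) (pvChunks iN nN l).length 1 (by omega) (le_refl 1)]
  have hmul : (iN : Int) * (nN : Int) = ((iN*nN : Nat) : Int) := by push_cast; ring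
  rw [hmul, PySem.List.slice_to_natCast, PySem.List.slice_to_natCast, Int.toNat_natCast]
  rw [← pv_chain_iff_rep iN hi nN l, ← pv_consec_iff_chain]
  rw [hlen]
  constructor
  · rintro ⟨_, hall⟩; exact hall
  · intro hall; exact ⟨by omega, hall⟩

theorem pv_go_eq (l : List Char) :
    ∀ is : List Int, (∀ i ∈ is, 1 ≤ i ∧ i ≤ 10) → pvGoA l is = pvGoB l is := by
  intro is
  induction is with
  | nil => intro _; rfl
  | cons i rest ih =>
      intro h
      obtain ⟨h1, h10⟩ := h i (List.mem_cons_self)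
      have hn2 : 2 ≤ PySem.Int.floordiv 30 i - 1 := by interval_cases i <;> decide
      have hiN : i = ((i.toNat : Nat) : Int) := (Int.toNat_of_nonneg (by omega)).symm
      have hnN : PySem.Int.floordiv 30 i - 1 = (((PySem.Int.floordiv 30 i - 1).toNat : Nat) : Int) :=
        (Int.toNat_of_nonneg (by omega)).symm
      have hcond := pv_cond_eq i.toNat (PySem.Int.floordiv 30 i - 1).toNat
        (by omega) (by omega) l
      rw [← hiN, ← hnN] at hcond
      show (if pvInnerA _ 1 then i else pvGoA l rest) = (if _ then i else pvGoB l rest)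
      rw [if_congr hcond rfl (ih (fun j hj => h j (List.mem_cons_of_mem _ hj)))]

-- ===== VERDICT (by name: the statement is the Claim_ definition above) =====
theorem divString_spec : Claim_equal_divString := by
  intro ins _
  unfold Spec_divString divString divString_alt
  apply pv_go_eq
  intro i hi
  have := (PySem.List.mem_pyRange_one).mp hi
  omega
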